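-- pv_equiv track=rewrite | github.com/rodgonzkus/CodeSignal-Arcade-Solved-Algorithms | CodeSignal/Are_Similar.py | solution
-- ===== SOURCE A (Python) =====
-- def solution(a, b):
--     if a == b:
--         return True
--     elif sorted(a) != sorted(b):
--         return False
--     for i in a:
--         if i not in b:
--             return False
--     cnt = 0
--     for i, j in zip(a, b):
--         if i != j:
--             cnt += 1
--             if cnt > 2:
--                 return False
--     if cnt <=2:
--         return True
-- ===== SOURCE B (Python) =====
-- def solution(a, b):
--     if len(a) != len(b):
--         return False
--     diffs = [(x, y) for x, y in zip(a, b) if x != y]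
--     if not diffs:
--         return True
--     if len(diffs) == 2:
--         (x1, y1), (x2, y2) = diffs
--         return x1 == y2 and x2 == y1
--     return False
-- ===== Notes on version B (the rewrite author's own statement) =====
-- stated objective: simpler
-- what changed: B drops the sort and the membership scan: it collects the mismatched position pairs in one zip pass and returns True iff there are none or exactly two forming a swap.
import Mathlib
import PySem

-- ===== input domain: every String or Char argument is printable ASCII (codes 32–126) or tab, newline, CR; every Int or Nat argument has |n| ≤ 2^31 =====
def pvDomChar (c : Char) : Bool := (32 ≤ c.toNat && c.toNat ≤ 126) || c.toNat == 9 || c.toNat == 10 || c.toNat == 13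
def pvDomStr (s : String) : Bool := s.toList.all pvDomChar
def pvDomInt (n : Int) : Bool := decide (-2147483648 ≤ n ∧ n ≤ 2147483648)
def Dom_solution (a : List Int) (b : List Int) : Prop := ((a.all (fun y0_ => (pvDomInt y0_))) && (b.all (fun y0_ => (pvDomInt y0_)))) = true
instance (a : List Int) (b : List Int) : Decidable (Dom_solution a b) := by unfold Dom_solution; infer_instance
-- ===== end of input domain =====

-- B replaces A's sort + membership scan + counting pass by a single zip pass that
-- collects the mismatched pairs and checks they are empty or a single swap (simpler, one pass).

-- ===== PORT A =====
-- `for i in a: if i not in b: return False`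
def pvMemLoop : List Int → List Int → Bool
  | [], _ => true
  | i :: rest, b => if i ∉ b then false else pvMemLoop rest b

-- `cnt = 0; for i, j in zip(a, b): …; if cnt <= 2: return True`
-- (the `else` branch of the final test is unreachable in Python, which would fall off returning None)
def pvCntLoop : List (Int × Int) → Int → Bool
  | [], cnt => decide (cnt ≤ 2)
  | (i, j) :: rest, cnt =>
    if i ≠ j then
      if cnt + 1 > 2 then false else pvCntLoop rest (cnt + 1)
    else pvCntLoop rest cnt

def solution (a : List Int) (b : List Int) : Bool :=
  if a = b then true
  else if PySem.List.sorted a (fun x => x) ≠ PySem.List.sorted b (fun x => x) then false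
  else if pvMemLoop a b then pvCntLoop (a.zip b) 0 else false

-- ===== PORT B =====
-- `diffs = [(x, y) for x, y in zip(a, b) if x != y]`
def pvDiffs (a b : List Int) : List (Int × Int) :=
  (a.zip b).filter (fun p => decide (p.1 ≠ p.2))

-- the if-chain on `diffs` from Source B
def pvJudge : List (Int × Int) → Bool
  | [] => true
  | [(x1, y1), (x2, y2)] => x1 == y2 && x2 == y1
  | _ => false

def solution_alt (a : List Int) (b : List Int) : Bool :=
  if a.length ≠ b.length then false
  else pvJudge (pvDiffs a b)

-- ===== PRECONDITION & SPEC =====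
def Spec_solution (a : List Int) (b : List Int) (out : Bool) : Prop := out = solution_alt a b
instance (a : List Int) (b : List Int) (out : Bool) : Decidable (Spec_solution a b out) := by unfold Spec_solution; infer_instance

-- ===== CLAIM (what is proved, stated in full; the proofs are below) =====
def Claim_equal_solution : Prop := ∀ (a : List Int) (b : List Int), Dom_solution a b → Spec_solution a b (solution a b)

-- ===== LEMMAS AND PROOFS =====

theorem pvDiffs_cons_eq (x : Int) (t s : List Int) :
    pvDiffs (x :: t) (x :: s) = pvDiffs t s := by
  simp [pvDiffs]

theorem pvDiffs_cons_ne {x y : Int} (h : x ≠ y) (t s : List Int) :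
    pvDiffs (x :: t) (y :: s) = (x, y) :: pvDiffs t s := by
  simp [pvDiffs, h]

theorem pvDiffs_self (a : List Int) : pvDiffs a a = [] := by
  induction a with
  | nil => rfl
  | cons x t ih => rw [pvDiffs_cons_eq, ih]

theorem pvDiffs_nil_iff {a b : List Int} (h : a.length = b.length) :
    pvDiffs a b = [] ↔ a = b := by
  induction a generalizing b with
  | nil => cases b with
    | nil => simp [pvDiffs]
    | cons y t => simp at h
  | cons x t ih =>
    cases b with
    | nil => simp at h
    | cons y s =>
      simp only [List.length_cons, Nat.add_right_cancel_iff] at h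
      by_cases hxy : x = y
      · subst hxy
        rw [pvDiffs_cons_eq, ih h]
        simp
      · rw [pvDiffs_cons_ne hxy]
        simp [hxy]

theorem pvMemLoop_of_mem {a b : List Int} (h : ∀ i ∈ a, i ∈ b) : pvMemLoop a b = true := by
  induction a with
  | nil => rfl
  | cons x t ih =>
    have hx : x ∈ b := h x (by simp)
    simp only [pvMemLoop, hx, not_true_eq_false, if_false]
    exact ih (fun i hi => h i (by simp [hi]))

theorem pvCntLoop_eq (a b : List Int) :
    ∀ cnt : Int, pvCntLoop (a.zip b) cnt = decide (cnt + ((pvDiffs a b).length : Int) ≤ 2) := by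
  suffices hgen : ∀ (l : List (Int × Int)) (cnt : Int),
      pvCntLoop l cnt = decide (cnt + ((l.filter (fun p => decide (p.1 ≠ p.2))).length : Int) ≤ 2) by
    intro cnt; exact hgen (a.zip b) cnt
  intro l
  induction l with
  | nil => intro cnt; simp [pvCntLoop]
  | cons p rest ih =>
    intro cnt
    obtain ⟨i, j⟩ := p
    have hfc : List.filter (fun p => decide (p.1 ≠ p.2)) ((i, j) :: rest)
        = if i ≠ j then (i, j) :: List.filter (fun p => decide (p.1 ≠ p.2)) rest
          else List.filter (fun p => decide (p.1 ≠ p.2)) rest := by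
      by_cases hij : i = j <;> simp [hij]
    rw [hfc]
    by_cases hij : i = j
    · rw [if_neg (by simpa using hij)]
      simp only [pvCntLoop, hij, ne_eq, not_true_eq_false, if_false]
      exact ih cnt
    · rw [if_pos hij]
      simp only [pvCntLoop, hij, ne_eq, not_false_eq_true, if_true]
      by_cases hc : cnt + 1 > 2
      · rw [if_pos hc, eq_comm, decide_eq_false_iff_not]
        simp only [List.length_cons]
        push_cast
        omega
      · rw [if_neg hc, ih (cnt + 1), decide_eq_decide]
        simp only [ne_eq, List.length_cons]
        push_cast
        omega

-- any pair collected by pvDiffs really mismatches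
theorem pvDiffs_mem_ne {a b : List Int} {p : Int × Int} (hp : p ∈ pvDiffs a b) : p.1 ≠ p.2 := by
  have := List.of_mem_filter hp
  simpa using this

-- one mismatched position: the multisets are the common part plus the two differing values
theorem pvDiffs_single {a b : List Int} (h : a.length = b.length) :
    ∀ {u v : Int}, pvDiffs a b = [(u, v)] →
      ∃ m : Multiset Int, (a : Multiset Int) = u ::ₘ m ∧ (b : Multiset Int) = v ::ₘ m := by
  induction a generalizing b with
  | nil =>
    intro u v hd
    cases b <;> simp [pvDiffs] at hd
  | cons x t ih =>
    intro u v hd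
    cases b with
    | nil => simp at h
    | cons y s =>
      simp only [List.length_cons, Nat.add_right_cancel_iff] at h
      by_cases hxy : x = y
      · subst hxy
        rw [pvDiffs_cons_eq] at hd
        obtain ⟨m, ha, hb⟩ := ih h hd
        refine ⟨x ::ₘ m, ?_, ?_⟩
        · rw [← Multiset.cons_coe, ha, Multiset.cons_swap]
        · rw [← Multiset.cons_coe, hb, Multiset.cons_swap]
      · rw [pvDiffs_cons_ne hxy] at hd
        simp only [List.cons.injEq, Prod.mk.injEq] at hd
        obtain ⟨⟨hx, hy⟩, hrest⟩ := hd
        subst hx; subst hy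
        have : t = s := (pvDiffs_nil_iff h).mp hrest
        subst this
        exact ⟨(t : Multiset Int), by rw [← Multiset.cons_coe], by rw [← Multiset.cons_coe]⟩

-- two mismatched positions: same, with both pairs
theorem pvDiffs_pair {a b : List Int} (h : a.length = b.length) :
    ∀ {x1 y1 x2 y2 : Int}, pvDiffs a b = [(x1, y1), (x2, y2)] →
      ∃ m : Multiset Int, (a : Multiset Int) = x1 ::ₘ x2 ::ₘ m ∧ (b : Multiset Int) = y1 ::ₘ y2 ::ₘ m := by
  induction a generalizing b with
  | nil =>
    intro x1 y1 x2 y2 hd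
    cases b <;> simp [pvDiffs] at hd
  | cons x t ih =>
    intro x1 y1 x2 y2 hd
    cases b with
    | nil => simp at h
    | cons y s =>
      simp only [List.length_cons, Nat.add_right_cancel_iff] at h
      by_cases hxy : x = y
      · subst hxy
        rw [pvDiffs_cons_eq] at hd
        obtain ⟨m, ha, hb⟩ := ih h hd
        refine ⟨x ::ₘ m, ?_, ?_⟩
        · rw [← Multiset.cons_coe, ha, Multiset.cons_swap x x1, Multiset.cons_swap x x2]
        · rw [← Multiset.cons_coe, hb, Multiset.cons_swap x y1, Multiset.cons_swap x y2]
      · rw [pvDiffs_cons_ne hxy] at hd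
        simp only [List.cons.injEq, Prod.mk.injEq] at hd
        obtain ⟨⟨hx, hy⟩, hrest⟩ := hd
        subst hx; subst hy
        obtain ⟨m, ha, hb⟩ := pvDiffs_single h hrest
        exact ⟨m, by rw [← Multiset.cons_coe, ha], by rw [← Multiset.cons_coe, hb]⟩

-- under multiset equality there is no single mismatched position
theorem pvDiffs_ne_single {a b : List Int} (hlen : a.length = b.length)
    (hperm : (a : Multiset Int) = (b : Multiset Int)) (u v : Int) :
    pvDiffs a b ≠ [(u, v)] := by
  intro hd
  obtain ⟨m, ha, hb⟩ := pvDiffs_single hlen hd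
  have huv : u ≠ v := pvDiffs_mem_ne (p := (u, v)) (by rw [hd]; exact List.mem_singleton_self _)
  rw [ha, hb] at hperm
  have := congrArg (Multiset.count u) hperm
  rw [Multiset.count_cons_self, Multiset.count_cons_of_ne huv] at this
  omega

-- under multiset equality, two mismatched positions must form a swap
theorem pvDiffs_pair_swap {a b : List Int} (hlen : a.length = b.length)
    (hperm : (a : Multiset Int) = (b : Multiset Int)) {x1 y1 x2 y2 : Int}
    (hd : pvDiffs a b = [(x1, y1), (x2, y2)]) : y1 = x2 ∧ y2 = x1 := by
  obtain ⟨m, ha, hb⟩ := pvDiffs_pair hlen hd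
  have h1 : x1 ≠ y1 := pvDiffs_mem_ne (p := (x1, y1)) (by rw [hd]; exact List.mem_cons_self ..)
  rw [ha, hb] at hperm
  constructor
  · by_contra hq
    have c2 := congrArg (Multiset.count y1) hperm
    simp only [Multiset.count_cons, if_neg (Ne.symm h1), if_neg hq] at c2
    split_ifs at c2 <;> omega
  · by_contra hq
    have c1 := congrArg (Multiset.count x1) hperm
    simp only [Multiset.count_cons, if_neg h1,
      if_neg (fun h => hq (Eq.symm h))] at c1
    split_ifs at c1 <;> omega

-- a genuine swap makes the two lists multiset-equal
theorem pvSwap_perm {a b : List Int} (hlen : a.length = b.length) {x1 x2 : Int}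
    (hd : pvDiffs a b = [(x1, x2), (x2, x1)]) :
    (a : Multiset Int) = (b : Multiset Int) := by
  obtain ⟨m, ha, hb⟩ := pvDiffs_pair hlen hd
  rw [ha, hb, Multiset.cons_swap]

theorem solution_eq_alt (a b : List Int) : solution a b = solution_alt a b := by
  by_cases hab : a = b
  · subst hab
    simp [solution, solution_alt, pvDiffs_self, pvJudge]
  · by_cases hsort : PySem.List.sorted a (fun x => x) = PySem.List.sorted b (fun x => x)
    · -- same multiset: A counts mismatches, B inspects pvDiffs
      have hperm : a.Perm b := (PySem.List.sorted_id_eq_sorted_id_iff_perm a b).mp hsort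
      have hlen : a.length = b.length := hperm.length_eq
      have hms : (a : Multiset Int) = (b : Multiset Int) := Multiset.coe_eq_coe.mpr hperm
      have hmem : pvMemLoop a b = true :=
        pvMemLoop_of_mem (fun i hi => hperm.mem_iff.mp hi)
      have hA : solution a b = pvCntLoop (a.zip b) 0 := by
        simp [solution, hab, hsort, hmem]
      have hB : solution_alt a b = pvJudge (pvDiffs a b) := by
        simp [solution_alt, hlen]
      rw [hA, hB, pvCntLoop_eq a b 0]
      rcases hdl : pvDiffs a b with _ | ⟨⟨u, v⟩, _ | ⟨⟨x2, y2⟩, rest⟩⟩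
      · exact absurd ((pvDiffs_nil_iff hlen).mp hdl) hab
      · exact absurd hdl (pvDiffs_ne_single hlen hms u v)
      · cases rest with
        | nil =>
          obtain ⟨hv, hy2⟩ := pvDiffs_pair_swap hlen hms hdl
          subst hv; subst hy2
          simp [pvJudge]
        | cons r t =>
          have hfalse : pvJudge ((u, v) :: (x2, y2) :: r :: t) = false := rfl
          rw [hfalse, decide_eq_false_iff_not]
          simp only [List.length_cons]
          push_cast
          omega
    · -- different sorted lists: A returns False; show B does too
      have hnperm : ¬ a.Perm b := fun h =>
        hsort ((PySem.List.sorted_id_eq_sorted_id_iff_perm a b).mpr h)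
      have hA : solution a b = false := by
        simp [solution, hab, hsort]
      rw [hA, eq_comm]
      by_cases hlen : a.length = b.length
      · have hB : solution_alt a b = pvJudge (pvDiffs a b) := by
          simp [solution_alt, hlen]
        rw [hB]
        rcases hdl : pvDiffs a b with _ | ⟨⟨x1, y1⟩, _ | ⟨⟨x2, y2⟩, rest⟩⟩
        · exact absurd ((pvDiffs_nil_iff hlen).mp hdl) hab
        · rfl
        · cases rest with
          | nil =>
            by_cases hsw : x1 = y2 ∧ x2 = y1
            · obtain ⟨h1, h2⟩ := hsw
              subst h1; subst h2
              exact absurd (Multiset.coe_eq_coe.mp (pvSwap_perm hlen hdl)) hnperm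
            · rcases not_and_or.mp hsw with h | h <;> simp [pvJudge, h]
          | cons r t => rfl
      · simp [solution_alt, hlen]

-- ===== VERDICT (by name: the statement is the Claim_ definition above) =====
theorem solution_spec : Claim_equal_solution := by
  intro a b _
  unfold Spec_solution
  exact solution_eq_alt a b
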